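-- pv_equiv track=rewrite | github.com/jimmybeckett/AdventOfCode2022 | aoc/2022/15.py | possible_x
-- ===== SOURCE A (Python) =====
-- def get_intervals(sensors, y):
--     intervals = []  # [x_a, x_b]
--     for (sensor_x, sensor_y), dist in sensors.items():
--         y_diff = abs(y - sensor_y)
--         if y_diff <= dist:
--             intervals.append(sorted((sensor_x - dist + y_diff, sensor_x + dist - y_diff)))
--     return sorted(intervals)
--
-- def possible_x(y, sensors, min_x, max_x):
--     intervals = get_intervals(sensors, y)
--     x = min_x
--     for int_start, int_end in intervals:
--         if x > max_x:
--             break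
--         elif int_start > x:
--             return x
--         elif int_end > x:
--             x = int_end
-- ===== SOURCE B (Python) =====
-- def merge_intervals(intervals):
--     # one-pass merge of the sorted intervals into maximal intervals
--     if not intervals:
--         return []
--     merged = []
--     cur_start, cur_end = intervals[0]
--     for start, end in intervals[1:]:
--         if start <= cur_end:
--             cur_end = max(cur_end, end)
--         else:
--             merged.append((cur_start, cur_end))
--             cur_start, cur_end = start, end
--     merged.append((cur_start, cur_end))
--     return merged
--
--
-- def possible_x(y, sensors, min_x, max_x):
--     intervals = sorted(
--         (sx - dist + abs(y - sy), sx + dist - abs(y - sy))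
--         for (sx, sy), dist in sensors.items()
--         if abs(y - sy) <= dist
--     )
--     x = min_x
--     for start, end in merge_intervals(intervals):
--         if x > max_x:
--             return None
--         if start > x:
--             return x
--         x = max(x, end)
--     return None
-- ===== Notes on version B (the rewrite author's own statement) =====
-- stated objective: alternative
-- what changed: B builds the row-coverage intervals in one comprehension (no per-pair sorted() call), merges the sorted intervals into maximal disjoint intervals in a separate one-pass helper, and then scans the merged list with a running candidate x = max(x, end); A scans the raw overlapping intervals directly with a three-way branch.
import Mathlib
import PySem

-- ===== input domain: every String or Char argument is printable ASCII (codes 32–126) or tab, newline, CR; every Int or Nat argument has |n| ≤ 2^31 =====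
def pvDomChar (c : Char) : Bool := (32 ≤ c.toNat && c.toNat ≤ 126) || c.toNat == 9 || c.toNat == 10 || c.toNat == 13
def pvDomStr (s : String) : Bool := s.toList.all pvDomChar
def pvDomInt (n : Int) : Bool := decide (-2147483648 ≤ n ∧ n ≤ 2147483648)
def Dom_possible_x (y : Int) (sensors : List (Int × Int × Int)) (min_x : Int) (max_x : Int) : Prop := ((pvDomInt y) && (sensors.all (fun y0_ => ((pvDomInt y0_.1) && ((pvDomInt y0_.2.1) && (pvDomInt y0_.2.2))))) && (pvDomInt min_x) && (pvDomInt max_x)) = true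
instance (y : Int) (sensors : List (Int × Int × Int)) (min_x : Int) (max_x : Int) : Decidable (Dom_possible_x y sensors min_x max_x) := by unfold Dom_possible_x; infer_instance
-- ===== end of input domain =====

-- B replaces A's scan over the raw sorted overlapping intervals by a separate merge pass
-- (maximal disjoint intervals) followed by a running-max gap scan; same cost, different decomposition.


-- ===== PORT A =====
-- get_intervals: a for-loop appending sorted((sx-dist+y_diff, sx+dist-y_diff)), then sorted(intervals).
-- sorted of a 2-tuple is transliterated as the conditional swap; sorted(list of pairs) is sorted2 (lex).
def pvGetIntervalsA (sensors : List (Int × Int × Int)) (y : Int) : List (Int × Int) :=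
  let intervals := sensors.foldl (fun acc t =>
    let y_diff := |y - t.2.1|
    if y_diff ≤ t.2.2 then
      acc ++ [if t.1 - t.2.2 + y_diff ≤ t.1 + t.2.2 - y_diff then
                (t.1 - t.2.2 + y_diff, t.1 + t.2.2 - y_diff)
              else
                (t.1 + t.2.2 - y_diff, t.1 - t.2.2 + y_diff)]
    else acc) []
  PySem.List.sorted2 intervals (fun p => p.1) (fun p => p.2)

-- A's for-loop over the intervals with early return/break
def pvScanA (max_x : Int) : List (Int × Int) → Int → Option Int
  | [], _ => none
  | (int_start, int_end) :: rest, x =>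
    if x > max_x then none
    else if int_start > x then some x
    else if int_end > x then pvScanA max_x rest int_end
    else pvScanA max_x rest x

def possible_x (y : Int) (sensors : List (Int × Int × Int)) (min_x : Int) (max_x : Int) : Option Int :=
  pvScanA max_x (pvGetIntervalsA sensors y) min_x

-- ===== PORT B =====
-- B's interval construction: one comprehension with a filter, then sorted (lex on the pairs)
def pvIntervalsB (y : Int) (sensors : List (Int × Int × Int)) : List (Int × Int) :=
  PySem.List.sorted2
    (sensors.filterMap (fun t =>
      if |y - t.2.1| ≤ t.2.2 then some (t.1 - t.2.2 + |y - t.2.1|, t.1 + t.2.2 - |y - t.2.1|) else none))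
    (fun p => p.1) (fun p => p.2)

-- merge_intervals' loop with the running (cur_start, cur_end)
def pvMergeAux : Int → Int → List (Int × Int) → List (Int × Int)
  | cur_start, cur_end, [] => [(cur_start, cur_end)]
  | cur_start, cur_end, (s, e) :: rest =>
    if s ≤ cur_end then pvMergeAux cur_start (max cur_end e) rest
    else (cur_start, cur_end) :: pvMergeAux s e rest

def pvMergeIntervals : List (Int × Int) → List (Int × Int)
  | [] => []
  | (s, e) :: rest => pvMergeAux s e rest

-- B's gap scan over the merged intervals (x = max(x, end))
def pvScanB (max_x : Int) : List (Int × Int) → Int → Option Int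
  | [], _ => none
  | (s, e) :: rest, x =>
    if x > max_x then none
    else if s > x then some x
    else pvScanB max_x rest (max x e)

def possible_x_alt (y : Int) (sensors : List (Int × Int × Int)) (min_x : Int) (max_x : Int) : Option Int :=
  pvScanB max_x (pvMergeIntervals (pvIntervalsB y sensors)) min_x

-- ===== PRECONDITION & SPEC =====
def Spec_possible_x (y : Int) (sensors : List (Int × Int × Int)) (min_x : Int) (max_x : Int) (out : Option Int) : Prop := out = possible_x_alt y sensors min_x max_x
instance (y : Int) (sensors : List (Int × Int × Int)) (min_x : Int) (max_x : Int) (out : Option Int) : Decidable (Spec_possible_x y sensors min_x max_x out) := by unfold Spec_possible_x; infer_instance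

-- ===== CLAIM (what is proved, stated in full; the proofs are below) =====
def Claim_equal_possible_x : Prop := ∀ (y : Int) (sensors : List (Int × Int × Int)) (min_x : Int) (max_x : Int), Dom_possible_x y sensors min_x max_x → Spec_possible_x y sensors min_x max_x (possible_x y sensors min_x max_x)

-- ===== LEMMAS AND PROOFS =====

-- A's and B's pre-sort interval lists coincide (the swap branch in A is dead: the kept pair is already ordered)
theorem pvIntervals_eq (y : Int) (sensors : List (Int × Int × Int)) :
    pvGetIntervalsA sensors y = pvIntervalsB y sensors := by
  unfold pvGetIntervalsA pvIntervalsB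
  have h : ∀ (acc : List (Int × Int)),
      sensors.foldl (fun acc t =>
        let y_diff := |y - t.2.1|
        if y_diff ≤ t.2.2 then
          acc ++ [if t.1 - t.2.2 + y_diff ≤ t.1 + t.2.2 - y_diff then
                    (t.1 - t.2.2 + y_diff, t.1 + t.2.2 - y_diff)
                  else
                    (t.1 + t.2.2 - y_diff, t.1 - t.2.2 + y_diff)]
        else acc) acc
      = acc ++ sensors.filterMap (fun t =>
          if |y - t.2.1| ≤ t.2.2 then some (t.1 - t.2.2 + |y - t.2.1|, t.1 + t.2.2 - |y - t.2.1|) else none) := by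
    induction sensors with
    | nil => intro acc; simp
    | cons t rest ih =>
      intro acc
      obtain ⟨sx, sy, dist⟩ := t
      by_cases h : |y - sy| ≤ dist
      · have hord : sx - dist + |y - sy| ≤ sx + dist - |y - sy| := by omega
        simp only [List.foldl_cons, List.filterMap_cons]
        rw [ih]
        simp [h, hord]
      · simp only [List.foldl_cons, List.filterMap_cons]
        rw [ih]
        simp [h]
  rw [h]
  simp

-- a candidate past max_x always yields None
theorem pvScanB_none (max_x : Int) (l : List (Int × Int)) (x : Int) (h : x > max_x) :
    pvScanB max_x l x = none := by
  cases l with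
  | nil => rfl
  | cons p rest => obtain ⟨s, e⟩ := p; simp [pvScanB, h]

-- A's three-way scan is B's running-max scan on the same list
theorem pvScanA_eq_scanB (max_x : Int) (l : List (Int × Int)) (x : Int) :
    pvScanA max_x l x = pvScanB max_x l x := by
  induction l generalizing x with
  | nil => rfl
  | cons p rest ih =>
    obtain ⟨s, e⟩ := p
    simp only [pvScanA, pvScanB]
    split_ifs with h1 h2 h3
    · rfl
    · rfl
    · rw [ih]; congr 1; omega
    · rw [ih]; congr 1; omega

-- one unfolding step of B's scan on a cons cell
theorem pvScanB_cons (mx s e x : Int) (r : List (Int × Int)) :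
    pvScanB mx ((s, e) :: r) x =
      if x > mx then none else if s > x then some x else pvScanB mx r (max x e) := rfl

-- merging does not change the result of the scan (no ordering hypothesis needed)
theorem pvScanB_mergeAux (max_x : Int) (rest : List (Int × Int)) (cs ce x : Int) :
    pvScanB max_x (pvMergeAux cs ce rest) x = pvScanB max_x ((cs, ce) :: rest) x := by
  induction rest generalizing cs ce x with
  | nil => rfl
  | cons p tail ih =>
    obtain ⟨s, e⟩ := p
    by_cases hm : s ≤ ce
    · rw [pvMergeAux, if_pos hm, ih, pvScanB_cons, pvScanB_cons, pvScanB_cons]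
      by_cases h1 : x > max_x
      · rw [if_pos h1, if_pos h1]
      · rw [if_neg h1, if_neg h1]
        by_cases h2 : cs > x
        · rw [if_pos h2, if_pos h2]
        · rw [if_neg h2, if_neg h2]
          by_cases h3 : max x ce > max_x
          · rw [if_pos h3, pvScanB_none _ _ _ (by
              have := le_max_right x (max ce e)
              have := le_max_right ce e
              omega)]
          · have hs : ¬ s > max x ce := by
              have := le_max_right x ce
              omega
            rw [if_neg h3, if_neg hs, max_assoc]
    · rw [pvMergeAux, if_neg hm, pvScanB_cons, pvScanB_cons]
      by_cases h1 : x > max_x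
      · rw [if_pos h1, if_pos h1]
      · rw [if_neg h1, if_neg h1]
        by_cases h2 : cs > x
        · rw [if_pos h2, if_pos h2]
        · rw [if_neg h2, if_neg h2, ih]

theorem pvScanB_merge (max_x : Int) (l : List (Int × Int)) (x : Int) :
    pvScanB max_x (pvMergeIntervals l) x = pvScanB max_x l x := by
  cases l with
  | nil => rfl
  | cons p rest =>
    obtain ⟨s, e⟩ := p
    rw [pvMergeIntervals, pvScanB_mergeAux]

-- ===== VERDICT (by name: the statement is the Claim_ definition above) =====
theorem possible_x_spec : Claim_equal_possible_x := by
  intro y sensors min_x max_x _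
  unfold Spec_possible_x possible_x possible_x_alt
  rw [pvIntervals_eq, pvScanB_merge, pvScanA_eq_scanB]
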